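/-
  jsmn: FROM THE FIELD-BY-FIELD RELATION TO BYTES. `TokensAt cfg μ tb ts` (Prog/Jsmn/Specs.lean) says what every 32-bit field of every
  token reads as; `Jsmn.encodeResult` (Json/Jsmn/Encode.lean) is the byte string `jsmn_main` promises at `out`. This file proves, once and for
  every configuration, that the first implies the second:
      the 4 bytes at `out` read as `u32 r`  ∧  TokensAt cfg μ (out + 4) ts  ∧  (0 ≤ r → r ≤ ts.length)   →   CodeAt μ out (encodeResult cfg r ts)
  and gives the length of that byte string. No machine state here: only `User.Mem.readLE` against single-byte reads.
-/
import Prog.Jsmn.State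
import X86.Derived.Prog.MemWords

namespace X86
namespace J6
open X86.User (CodeAt RegsKept Span FlagsOK Layout toNat_add_ofNat toNat_ofNat_lt' add_ofNat_add)
open Jsmn

set_option linter.unusedVariables false

/-- A 4-byte little-endian read, as its four single-byte reads. -/
theorem readLE4_bytes (μ : User.Mem) (a : Word) :
    μ.readLE a 4 = (μ.read a).toNat + 256 * ((μ.read (a + 1)).toNat + 256 * ((μ.read (a + 2)).toNat +
      256 * ((μ.read (a + 3)).toNat + 256 * 0))) := by
  have e2 : a + 1 + 1 = a + 2 := by rw [UInt64.add_assoc]; rfl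
  have e3 : a + 2 + 1 = a + 3 := by rw [UInt64.add_assoc]; rfl
  simp only [User.Mem.readLE, e2, e3]

@[simp] theorem le32_length (x : Int) : (le32 x).length = 4 := rfl

/-- **A 32-bit field, as bytes**: where a 4-byte read gives `u32 x`, the four bytes `le32 x` lie. -/
theorem le32_at {μ : User.Mem} {a : Word} {x : Int} (h : μ.readLE a 4 = u32 x) : CodeAt μ a (le32 x) := by
  rw [readLE4_bytes] at h
  have b0 := (μ.read a).toNat_lt
  have b1 := (μ.read (a + 1)).toNat_lt
  have b2 := (μ.read (a + 2)).toNat_lt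
  have b3 := (μ.read (a + 3)).toNat_lt
  have x0 : UInt8.ofNat (u32 x) = μ.read a := byte_ofNat_of_mod (by omega)
  have x1 : UInt8.ofNat (u32 x / 256) = μ.read (a + 1) := byte_ofNat_of_mod (by omega)
  have x2 : UInt8.ofNat (u32 x / 65536) = μ.read (a + 2) := byte_ofNat_of_mod (by omega)
  have x3 : UInt8.ofNat (u32 x / 16777216) = μ.read (a + 3) := byte_ofNat_of_mod (by omega)
  intro i hi
  simp only [le32, List.length_cons, List.length_nil] at hi
  simp only [le32, x0, x1, x2, x3]
  match i, hi with
  | 0, _ => simp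
  | 1, _ => simp
  | 2, _ => simp
  | 3, _ => simp

/-- An `int` field, as bytes. -/
theorem Holds32.codeAt {μ : User.Mem} {a : Word} {x : Int} (h : Holds32 (μ.readLE a 4) x) : CodeAt μ a (le32 x) := le32_at h.1

theorem Token.bytes_length (cfg : Jsmn.Config) (t : Token) : (Token.bytes cfg t).length = cfg.tokSize := by
  unfold Token.bytes Jsmn.Config.tokSize
  cases cfg.parentLinks <;> simp

/-- **One token, as bytes.** -/
theorem TokAt.codeAt {cfg : Jsmn.Config} {μ : User.Mem} {a : Word} {t : Token} (h : TokAt cfg μ a t) : CodeAt μ a (Token.bytes cfg t) := by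
  have htype : μ.readLE a 4 = u32 (t.type : Int) := by
    have := User.Mem.readLE4_lt μ a
    rw [h.type] at this ⊢
    unfold u32; omega
  have e4 : a + UInt64.ofNat 4 = a + 4 := rfl
  have e8 : a + UInt64.ofNat (4 + 4) = a + 8 := rfl
  have e12 : a + UInt64.ofNat (4 + 4 + 4) = a + 12 := rfl
  have e16 : a + UInt64.ofNat (4 + 4 + 4 + 4) = a + 16 := rfl
  have h4 : CodeAt μ a (le32 t.type ++ le32 t.start ++ le32 t.«end» ++ le32 t.size) := by
    refine CodeAt.append (CodeAt.append (CodeAt.append (le32_at htype) ?_) ?_) ?_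
    · rw [le32_length, e4]; exact h.start.codeAt
    · simp only [List.length_append, le32_length]; rw [e8]; exact h.«end».codeAt
    · simp only [List.length_append, le32_length]; rw [e12]; exact h.size.codeAt
  unfold Token.bytes
  refine CodeAt.append h4 ?_
  cases hl : cfg.parentLinks with
  | false => exact CodeAt.nil _ _
  | true =>
    simp only [List.length_append, le32_length, if_true]
    rw [e16]; exact (h.parent hl).codeAt

theorem flatMap_take_length (cfg : Jsmn.Config) (ts : Tokens) (k : Nat) (hk : k ≤ ts.length) :
    ((ts.take k).flatMap (Token.bytes cfg)).length = cfg.tokSize * k := by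
  induction k with
  | zero => simp
  | succ k ih =>
    have hk' : k < ts.length := hk
    rw [List.take_succ_eq_append_getElem hk', List.flatMap_append, List.length_append, ih (by omega)]
    simp [Token.bytes_length, Nat.mul_succ]

/-- **The first `k` tokens of the array, as bytes.** -/
theorem TokensAt.codeAt_take {cfg : Jsmn.Config} {μ : User.Mem} {tb : Word} {ts : Tokens} (h : TokensAt cfg μ tb ts) (k : Nat)
    (hk : k ≤ ts.length) : CodeAt μ tb ((ts.take k).flatMap (Token.bytes cfg)) := by
  induction k with
  | zero => simpa using CodeAt.nil μ tb
  | succ k ih =>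
    have hk' : k < ts.length := hk
    rw [List.take_succ_eq_append_getElem hk', List.flatMap_append]
    refine CodeAt.append (ih (by omega)) ?_
    rw [flatMap_take_length cfg ts k (by omega)]
    have hk1 := (h k hk').codeAt
    unfold tokAddr at hk1
    simpa only [List.flatMap_cons, List.flatMap_nil, List.append_nil] using hk1

/-- **What `jsmn_main` promises at `out`**: the result, then (if it is not negative) that many tokens. -/
theorem encodeResult_at {cfg : Jsmn.Config} {μ : User.Mem} {out : Word} {r : Int} {ts : Tokens} (hr : μ.readLE out 4 = u32 r)
    (ht : TokensAt cfg μ (out + 4) ts) (hle : 0 ≤ r → r.toNat ≤ ts.length) : CodeAt μ out (encodeResult cfg r ts) := by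
  unfold encodeResult
  refine CodeAt.append (le32_at hr) ?_
  by_cases hneg : r < 0
  · simp only [hneg, if_true]; exact CodeAt.nil _ _
  · simp only [hneg, if_false, le32_length]
    exact ht.codeAt_take r.toNat (hle (by omega))

/-- The number of bytes `jsmn_main` returns. -/
theorem encodeResult_length (cfg : Jsmn.Config) (r : Int) (ts : Tokens) (hle : 0 ≤ r → r.toNat ≤ ts.length) :
    (encodeResult cfg r ts).length = if r < 0 then 4 else 4 + cfg.tokSize * r.toNat := by
  unfold encodeResult
  by_cases hneg : r < 0
  · simp [hneg]
  · simp only [hneg, if_false, List.length_append, le32_length]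
    rw [flatMap_take_length cfg ts r.toNat (hle (by omega))]

end J6
end X86
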